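-- pv_equiv track=rewrite | github.com/Sebismael23/cs2450-Software-Engineer-2025 | src/file_functions.py | detect_file_format
-- ===== SOURCE A (Python) =====
-- def detect_file_format(instructions):
--     """
--     Detect if a file contains 4-digit or 6-digit instructions.
--
--     Args:
--         instructions: List of parsed integer instructions
--
--     Returns:
--         str: "4-digit" or "6-digit" or None if empty list
--     """
--     if not instructions:
--         return None
--
--     # Check the range of each instruction
--     four_digit_count = 0
--     six_digit_count = 0
--
--     for instruction in instructions:
--         if -9999 <= instruction <= 9999:
--             four_digit_count += 1
--         if -999999 <= instruction <= 999999: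
--             six_digit_count += 1
--
--     # If all instructions fit in 4-digit range
--     if four_digit_count == len(instructions):
--         # Check if any instruction has 5 or 6 digits
--         for instruction in instructions:
--             if abs(instruction) >= 10000:
--                 return "6-digit"
--         return "4-digit"
--     else:
--         return "6-digit"
-- ===== SOURCE B (Python) =====
-- def detect_file_format(instructions):
--     if not instructions:
--         return None
--     m = max(abs(x) for x in instructions)
--     return "4-digit" if m <= 9999 else "6-digit"
-- ===== Notes on version B (the rewrite author's own statement) =====
-- stated objective: simpler
-- what changed: Replaces A's two counters, count-vs-length comparison and second scan for a large absolute value with a single fold to the maximum absolute value followed by one threshold test.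
import Mathlib
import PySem

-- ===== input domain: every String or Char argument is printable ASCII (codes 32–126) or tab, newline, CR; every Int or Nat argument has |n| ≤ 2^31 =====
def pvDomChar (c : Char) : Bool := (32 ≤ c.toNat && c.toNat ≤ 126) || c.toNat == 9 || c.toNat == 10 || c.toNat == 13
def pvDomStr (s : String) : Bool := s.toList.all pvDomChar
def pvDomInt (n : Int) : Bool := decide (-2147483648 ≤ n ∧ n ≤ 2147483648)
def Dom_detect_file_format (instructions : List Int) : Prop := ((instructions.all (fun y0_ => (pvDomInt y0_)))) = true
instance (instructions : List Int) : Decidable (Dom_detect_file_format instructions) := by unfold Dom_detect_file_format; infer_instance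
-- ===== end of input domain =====

-- ===== PORT A =====
-- B replaces A's two counters and second scan with one max-of-abs fold and a threshold test (simpler).
-- inner early-return loop of A: first |i| >= 10000 gives "6-digit", else "4-digit"
def detectInnerA : List Int → Option String
  | [] => some "4-digit"
  | i :: rest => if 10000 ≤ |i| then some "6-digit" else detectInnerA rest

def detect_file_format (instructions : List Int) : Option String :=
  if instructions = [] then none
  else
    let counts := instructions.foldl
      (fun (c : Int × Int) i =>
        (if -9999 ≤ i ∧ i ≤ 9999 then c.1 + 1 else c.1,
         if -999999 ≤ i ∧ i ≤ 999999 then c.2 + 1 else c.2)) (0, 0)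
    if counts.1 = (instructions.length : Int) then
      detectInnerA instructions
    else
      some "6-digit"

-- ===== PORT B =====
def detect_file_format_alt (instructions : List Int) : Option String :=
  match instructions with
  | [] => none
  | x :: xs =>
    let m := xs.foldl (fun a y => max a |y|) |x|
    if m ≤ 9999 then some "4-digit" else some "6-digit"

-- ===== PRECONDITION & SPEC =====
def Spec_detect_file_format (instructions : List Int) (out : Option String) : Prop := out = detect_file_format_alt instructions
instance (instructions : List Int) (out : Option String) : Decidable (Spec_detect_file_format instructions out) := by unfold Spec_detect_file_format; infer_instance

-- ===== CLAIM (what is proved, stated in full; the proofs are below) =====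
def Claim_equal_detect_file_format : Prop := ∀ (instructions : List Int), Dom_detect_file_format instructions → Spec_detect_file_format instructions (detect_file_format instructions)

-- ===== LEMMAS AND PROOFS =====

-- the first counter equals the count of in-range elements
theorem fold_fst_count (l : List Int) (c : Int × Int) :
    (l.foldl (fun (c : Int × Int) i =>
        (if -9999 ≤ i ∧ i ≤ 9999 then c.1 + 1 else c.1,
         if -999999 ≤ i ∧ i ≤ 999999 then c.2 + 1 else c.2)) c).1
    = c.1 + (l.countP (fun i => decide (-9999 ≤ i ∧ i ≤ 9999)) : Int) := by
  induction l generalizing c with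
  | nil => simp
  | cons x xs ih =>
    simp only [List.foldl_cons, List.countP_cons, ih]
    by_cases h : -9999 ≤ x ∧ x ≤ 9999 <;> simp [h] <;> omega

theorem inner_of_small (l : List Int) (h : ∀ x ∈ l, |x| ≤ 9999) :
    detectInnerA l = some "4-digit" := by
  induction l with
  | nil => rfl
  | cons x xs ih =>
    have hx := h x (List.mem_cons_self)
    unfold detectInnerA
    rw [if_neg (show ¬ 10000 ≤ |x| by omega)]
    exact ih (fun y hy => h y (List.mem_cons_of_mem _ hy))

theorem foldl_max_le (xs : List Int) (a : Int) :
    (xs.foldl (fun a y => max a |y|) a ≤ 9999) ↔ (a ≤ 9999 ∧ ∀ y ∈ xs, |y| ≤ 9999) := by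
  induction xs generalizing a with
  | nil => simp
  | cons x xs ih =>
    simp only [List.foldl_cons, ih, List.mem_cons]
    constructor
    · rintro ⟨h1, h2⟩
      refine ⟨le_trans (le_max_left a |x|) h1, fun y hy => ?_⟩
      rcases hy with rfl | hy
      · exact le_trans (le_max_right a |y|) h1
      · exact h2 y hy
    · rintro ⟨h1, h2⟩
      exact ⟨max_le h1 (h2 x (Or.inl rfl)), fun y hy => h2 y (Or.inr hy)⟩

-- ===== VERDICT (by name: the statement is the Claim_ definition above) =====
theorem detect_file_format_spec : Claim_equal_detect_file_format := by
  intro instructions _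
  unfold Spec_detect_file_format detect_file_format detect_file_format_alt
  cases instructions with
  | nil => simp
  | cons x xs =>
    simp only [if_neg (List.cons_ne_nil x xs)]
    by_cases hall : ∀ y ∈ x :: xs, |y| ≤ 9999
    · have hcount : ((x :: xs).countP (fun i => decide (-9999 ≤ i ∧ i ≤ 9999))) = (x :: xs).length := by
        apply List.countP_eq_length.2
        intro y hy
        have := abs_le.1 (hall y hy)
        simp
        omega
      rw [fold_fst_count]
      simp only [hcount]
      rw [if_pos (by omega)]
      rw [inner_of_small _ hall]
      rw [if_pos ((foldl_max_le xs |x|).2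
        ⟨hall x List.mem_cons_self, fun y hy => hall y (List.mem_cons_of_mem _ hy)⟩)]
    · have hm : ¬ (xs.foldl (fun a y => max a |y|) |x| ≤ 9999) := by
        intro hle
        rcases (foldl_max_le xs |x|).1 hle with ⟨h1, h2⟩
        apply hall
        intro y hy
        rcases List.mem_cons.1 hy with rfl | hy
        · exact h1
        · exact h2 y hy
      rw [if_neg hm]
      by_cases hc : ((x :: xs).foldl (fun (c : Int × Int) i =>
        (if -9999 ≤ i ∧ i ≤ 9999 then c.1 + 1 else c.1,
         if -999999 ≤ i ∧ i ≤ 999999 then c.2 + 1 else c.2)) (0, 0)).1 = ((x :: xs).length : Int)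
      · exfalso
        rw [fold_fst_count] at hc
        have hcount : ((x :: xs).countP (fun i => decide (-9999 ≤ i ∧ i ≤ 9999))) = (x :: xs).length := by omega
        have := List.countP_eq_length.1 hcount
        apply hall
        intro y hy
        have := this y hy
        simp only [decide_eq_true_eq] at this
        rw [abs_le]
        omega
      · rw [if_neg hc]
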